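-- pv_equiv track=rewrite | github.com/denisschmidt/leetcode | 1 hot/1049. Last Stone Weight II/py/main.py | lastStoneWeightII
-- ===== SOURCE A (Python) =====
-- from typing import List
--
-- def lastStoneWeightII(stones: List[int]) -> int:
--     total = sum(stones)
--     target = total >> 1
--
--     dp = [False] * (target + 1)
--
--     dp[0] = True
--
--     for stone in stones:
--       for num in reversed(range(stone, target + 1)):
--         dp[num] = dp[num] or dp[num - stone]
--
--     reachSum = target
--
--     while dp[reachSum] == False:
--       reachSum -= 1
--
--     return total - (2 * reachSum)
-- ===== SOURCE B (Python) =====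
-- from typing import List
--
-- def lastStoneWeightII(stones: List[int]) -> int:
--     # DP over achievable absolute signed differences |±s1 ± s2 ± ...|:
--     # smashing two piles of stones leaves the difference of their sums.
--     diffs = {0}
--     for stone in stones:
--         diffs = {abs(d - stone) for d in diffs} | {d + stone for d in diffs}
--     return min(diffs)
-- ===== Notes on version B (the rewrite author's own statement) =====
-- stated objective: alternative
-- what changed: Instead of A's boolean subset-sum array of size total//2 with a reverse-index inner loop, a final downward scan and the total-2*reachSum formula, B runs a DP over a different state space: the set of achievable absolute signed differences |+-s1+-s2...| (each stone either joins or opposes the running pile), returning its minimum directly; the live set of distinct differences is typically far smaller than the total weight, so the per-stone work drops.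
-- outside the precondition, e.g. on lastStoneWeightII([-1, 1]): A returns 0, B returns 0; on lastStoneWeightII([-5]): A raises IndexError, B returns -5; on lastStoneWeightII([1, 1, -1]): A returns 1, B returns -1
import Mathlib
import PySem

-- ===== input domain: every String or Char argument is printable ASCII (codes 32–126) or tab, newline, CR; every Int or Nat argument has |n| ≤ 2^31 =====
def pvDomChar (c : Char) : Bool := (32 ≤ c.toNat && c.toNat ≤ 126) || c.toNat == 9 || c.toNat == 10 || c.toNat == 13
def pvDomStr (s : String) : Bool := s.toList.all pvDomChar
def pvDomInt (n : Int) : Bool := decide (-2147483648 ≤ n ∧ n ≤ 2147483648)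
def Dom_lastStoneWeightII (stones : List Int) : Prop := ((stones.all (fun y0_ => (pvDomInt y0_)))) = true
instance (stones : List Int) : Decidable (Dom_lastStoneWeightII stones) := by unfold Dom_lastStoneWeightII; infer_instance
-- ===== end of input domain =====

-- B replaces A's boolean subset-sum array (reverse-index inner loop, downward while-scan,
-- total - 2*reachSum formula) by a DP over a different state space: the set of achievable
-- absolute signed differences |±s1±s2±…|, whose minimum is returned directly.

-- ===== PORT A =====
-- 'dp[num] = dp[num] or dp[num - stone]' body of the inner loop
def lswSetNum (stone : Int) (dp : List Bool) (num : Int) : List Bool :=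
  dp.set num.toNat
    ((PySem.List.pyGet? dp num).getD false || (PySem.List.pyGet? dp (num - stone)).getD false)

-- 'for num in reversed(range(stone, target + 1)): …'
def lswDpStep (target : Int) (dp : List Bool) (stone : Int) : List Bool :=
  ((PySem.List.pyRange stone (target + 1)).reverse).foldl (lswSetNum stone) dp

-- 'while dp[reachSum] == False: reachSum -= 1'  (fuel-bounded; under Pre_ dp[0] is True so the fuel suffices)
def lswFindReach (dp : List Bool) : Nat → Int → Int
  | 0, r => r
  | n + 1, r => if (PySem.List.pyGet? dp r).getD false then r else lswFindReach dp n (r - 1)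

def lastStoneWeightII (stones : List Int) : Int :=
  let total := stones.sum
  let target := total >>> (1 : Nat)
  let dp := (List.replicate (target + 1).toNat false).set 0 true
  let dp := stones.foldl (lswDpStep target) dp
  total - 2 * lswFindReach dp (target.toNat + 1) target

-- ===== PORT B =====
-- 'diffs = {abs(d - stone) for d in diffs} | {d + stone for d in diffs}'
def lswDiffStep (diffs : PySem.Set Int) (stone : Int) : PySem.Set Int :=
  PySem.Set.union (PySem.Set.ofList (diffs.map (fun d => |d - stone|)))
                  (PySem.Set.ofList (diffs.map (fun d => d + stone)))

-- 'min(diffs)': diffs is never empty (it always contains a value), so getD 0 is never used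
def lastStoneWeightII_alt (stones : List Int) : Int :=
  let diffs := stones.foldl lswDiffStep (PySem.Set.ofList [0])
  (PySem.List.min? diffs (fun d => d)).getD 0

-- ===== PRECONDITION & SPEC =====
-- Pre_ restricts to nonnegative stone weights (the problem's natural domain): with a negative
-- stone A almost always raises IndexError, and where it does return the value depends on
-- Python's negative-index wraparound into the dp array.
def Pre_lastStoneWeightII (stones : List Int) : Prop := ∀ s ∈ stones, 0 ≤ s
instance (stones : List Int) : Decidable (Pre_lastStoneWeightII stones) := by
  unfold Pre_lastStoneWeightII; infer_instance
def pvWitness_lastStoneWeightII : List Int := [2, 7, 4, 1, 8, 1]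

def Spec_lastStoneWeightII (stones : List Int) (out : Int) : Prop := out = lastStoneWeightII_alt stones
instance (stones : List Int) (out : Int) : Decidable (Spec_lastStoneWeightII stones out) := by unfold Spec_lastStoneWeightII; infer_instance

-- ===== CLAIM (what is proved, stated in full; the proofs are below) =====
def Claim_equal_lastStoneWeightII : Prop := ∀ (stones : List Int), Dom_lastStoneWeightII stones → Pre_lastStoneWeightII stones → Spec_lastStoneWeightII stones (lastStoneWeightII stones)

-- ===== LEMMAS AND PROOFS =====

-- ghost subset-sum set linking A's dp array and B's difference set
def lswSumsStep (sums : PySem.Set Int) (stone : Int) : PySem.Set Int :=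
  PySem.Set.union sums (PySem.Set.ofList (sums.map (fun s => s + stone)))

-- the invariant tying A's dp array to the ghost set of reachable subset sums
def lswInv (target : Int) (dp : List Bool) (S : List Int) : Prop :=
  dp.length = (target + 1).toNat ∧ (∀ x ∈ S, 0 ≤ x) ∧
  ∀ i : Nat, (i : Int) ≤ target → (dp.getD i false = true ↔ (i : Int) ∈ S)

lemma lswGet_nonneg (dp : List Bool) (i : Int) (h : 0 ≤ i) :
    (PySem.List.pyGet? dp i).getD false = dp.getD i.toNat false := by
  simp only [PySem.List.pyGet?, PySem.List.pyIdx?, if_pos h]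
  by_cases h2 : i < (dp.length : Int)
  · rw [if_pos h2]; simp [List.getD_eq_getElem?_getD]
  · rw [if_neg h2, List.getD_eq_getElem?_getD, List.getElem?_eq_none (by omega)]; simp

lemma lswRange_nil (a b : Int) (h : b ≤ a) : PySem.List.pyRange a b = [] := by
  rcases hr : PySem.List.pyRange a b with _ | ⟨x, xs⟩
  · rfl
  · exfalso; have hx : x ∈ PySem.List.pyRange a b := by rw [hr]; exact List.mem_cons_self
    rw [PySem.List.mem_pyRange_one] at hx; omega

lemma lswGetD_set (l : List Bool) (k j : Nat) (v : Bool) :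
    (l.set k v).getD j false = if j = k ∧ k < l.length then v else l.getD j false := by
  simp only [List.getD_eq_getElem?_getD, List.getElem?_set]
  split_ifs with h1 h2 h3 h4 <;> simp_all

lemma lswFold_length (s : Int) (nums : List Int) :
    ∀ dp : List Bool, (nums.foldl (lswSetNum s) dp).length = dp.length := by
  induction nums with
  | nil => simp
  | cons x xs ih => intro dp; simp [List.foldl_cons, ih, lswSetNum]

lemma lswFold_getD (s : Int) (hs : 0 ≤ s) :
    ∀ (n : Nat) (b : Int) (dp : List Bool), (b - s).toNat = n → b ≤ (dp.length : Int) →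
    ∀ i : Nat,
      ((PySem.List.pyRange s b).reverse.foldl (lswSetNum s) dp).getD i false =
        if s ≤ (i : Int) ∧ (i : Int) < b
        then dp.getD i false || dp.getD ((i : Int) - s).toNat false
        else dp.getD i false := by
  intro n
  induction n with
  | zero =>
    intro b dp hn hb i
    rw [lswRange_nil s b (by omega)]
    rw [if_neg (by omega)]
    rfl
  | succ n ih =>
    intro b dp hn hb i
    have hsb : s ≤ b - 1 := by omega
    have hb1 : b = (b - 1) + 1 := by ring
    rw [hb1, PySem.List.pyRange_one_succ_right hsb, List.reverse_append]
    simp only [List.reverse_cons, List.reverse_nil, List.nil_append, List.singleton_append,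
      List.foldl_cons]
    have hlen1 : (lswSetNum s dp (b - 1)).length = dp.length := by simp [lswSetNum]
    rw [ih (b - 1) (lswSetNum s dp (b - 1)) (by omega) (by omega) i]
    have hk : (((b - 1).toNat : Int)) = b - 1 := Int.toNat_of_nonneg (by omega)
    have hklen : (b - 1).toNat < dp.length := by omega
    have hv : lswSetNum s dp (b - 1) =
        dp.set (b - 1).toNat (dp.getD (b - 1).toNat false || dp.getD (b - 1 - s).toNat false) := by
      rw [lswSetNum, lswGet_nonneg dp (b - 1) (by omega), lswGet_nonneg dp (b - 1 - s) (by omega)]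
    rw [hv]
    by_cases hsi : s ≤ (i : Int)
    · by_cases hib : (i : Int) < b - 1
      · rw [if_pos ⟨hsi, hib⟩, if_pos ⟨hsi, by omega⟩]
        rw [lswGetD_set, lswGetD_set, if_neg (by omega), if_neg (by omega)]
      · by_cases hie : (i : Int) = b - 1
        · rw [if_neg (by omega), if_pos ⟨hsi, by omega⟩]
          rw [lswGetD_set, if_pos ⟨by omega, hklen⟩]
          have h1 : (b - 1).toNat = i := by omega
          have h2 : (b - 1 - s).toNat = ((i : Int) - s).toNat := by omega
          rw [h1, h2]
        · rw [if_neg (by omega), if_neg (by omega)]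
          rw [lswGetD_set, if_neg (by omega)]
    · rw [if_neg (by omega), if_neg (by omega), lswGetD_set, if_neg (by omega)]

lemma lswSumsStep_mem (S : PySem.Set Int) (s x : Int) :
    x ∈ lswSumsStep S s ↔ x ∈ S ∨ x - s ∈ S := by
  rw [lswSumsStep, PySem.Set.mem_union, PySem.Set.mem_ofList, List.mem_map]
  constructor
  · rintro (h | ⟨a, ha, rfl⟩)
    · exact Or.inl h
    · exact Or.inr (by simpa using ha)
  · rintro (h | h)
    · exact Or.inl h
    · exact Or.inr ⟨x - s, h, by ring⟩

lemma lswInv_step (target : Int) (ht : 0 ≤ target) (s : Int) (hs : 0 ≤ s)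
    (dp : List Bool) (S : PySem.Set Int) (h : lswInv target dp S) :
    lswInv target (lswDpStep target dp s) (lswSumsStep S s) := by
  obtain ⟨hlen, hpos, hmem⟩ := h
  have hblen : target + 1 ≤ (dp.length : Int) := by omega
  refine ⟨?_, ?_, ?_⟩
  · rw [lswDpStep, lswFold_length]; exact hlen
  · intro x hx
    rw [lswSumsStep_mem] at hx
    rcases hx with hx | hx
    · exact hpos x hx
    · have := hpos _ hx; omega
  · intro i hi
    rw [lswDpStep, lswFold_getD s hs (target + 1 - s).toNat (target + 1) dp rfl hblen i]
    rw [lswSumsStep_mem]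
    by_cases hsi : s ≤ (i : Int)
    · rw [if_pos ⟨hsi, by omega⟩, Bool.or_eq_true]
      have h1 := hmem i hi
      have h2 := hmem ((i : Int) - s).toNat (by omega)
      rw [Int.toNat_of_nonneg (by omega)] at h2
      rw [h1, h2]
    · rw [if_neg (by omega)]
      rw [hmem i hi]
      constructor
      · exact Or.inl
      · rintro (h | h)
        · exact h
        · exact absurd (hpos _ h) (by omega)

lemma lswInv_fold (target : Int) (ht : 0 ≤ target) :
    ∀ (l : List Int), (∀ x ∈ l, 0 ≤ x) → ∀ dp S, lswInv target dp S →
      lswInv target (l.foldl (lswDpStep target) dp) (l.foldl lswSumsStep S) := by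
  intro l
  induction l with
  | nil => intro _ dp S h; exact h
  | cons x xs ih =>
    intro hl dp S h
    simp only [List.foldl_cons]
    exact ih (fun y hy => hl y (List.mem_cons_of_mem _ hy)) _ _
      (lswInv_step target ht x (hl x List.mem_cons_self) dp S h)

lemma lswZero_mem (l : List Int) : ∀ S : PySem.Set Int, 0 ∈ S → 0 ∈ l.foldl lswSumsStep S := by
  induction l with
  | nil => intro S h; exact h
  | cons x xs ih =>
    intro S h
    simp only [List.foldl_cons]
    exact ih _ ((lswSumsStep_mem S x 0).2 (Or.inl h))

lemma lswInv_init (target : Int) :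
    lswInv target ((List.replicate (target + 1).toNat false).set 0 true) (PySem.Set.ofList [0]) := by
  refine ⟨by simp, ?_, ?_⟩
  · intro x hx; rw [PySem.Set.mem_ofList] at hx; simp at hx; omega
  · intro i hi
    rw [PySem.Set.mem_ofList]
    simp only [List.mem_singleton]
    rcases Nat.eq_zero_or_pos i with h0 | h0
    · subst h0
      rw [List.getD_eq_getElem?_getD, List.getElem?_set_self (by simp; omega)]
      simp
    · rw [List.getD_eq_getElem?_getD, List.getElem?_set_ne (by omega)]
      constructor
      · intro h
        by_cases hlt : i < (target + 1).toNat
        · simp [hlt] at h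
        · rw [List.getElem?_eq_none (by simpa using hlt)] at h; simp at h
      · intro h; omega

lemma lswFindReach_spec (dp : List Bool) :
    ∀ (fuel : Nat) (r : Int), 0 ≤ r → r < (fuel : Int) →
    (∃ j : Nat, (j : Int) ≤ r ∧ dp.getD j false = true) →
    0 ≤ lswFindReach dp fuel r ∧ lswFindReach dp fuel r ≤ r ∧
    dp.getD (lswFindReach dp fuel r).toNat false = true ∧
    ∀ j : Nat, lswFindReach dp fuel r < (j : Int) → (j : Int) ≤ r → dp.getD j false = false := by
  intro fuel
  induction fuel with
  | zero => intro r h1 h2; omega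
  | succ n ih =>
    intro r hr hrf ⟨j, hj, hjt⟩
    rw [lswFindReach]
    rw [lswGet_nonneg dp r hr]
    by_cases hcur : dp.getD r.toNat false = true
    · rw [if_pos hcur]
      exact ⟨hr, le_refl r, hcur, fun j h1 h2 => by omega⟩
    · rw [if_neg hcur]
      simp only [Bool.not_eq_true] at hcur
      have hjr : (j : Int) ≠ r := by
        intro h; rw [show r.toNat = j by omega] at hcur; rw [hjt] at hcur
        exact Bool.false_ne_true hcur.symm
      have hr1 : 0 ≤ r - 1 := by
        rcases Int.lt_or_le 0 r with h | h
        · omega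
        · exfalso; omega
      have := ih (r - 1) hr1 (by omega) ⟨j, by omega, hjt⟩
      refine ⟨by omega, by omega, this.2.2.1, ?_⟩
      intro k hk1 hk2
      rcases Int.lt_or_le (k : Int) r with h | h
      · exact this.2.2.2 k hk1 (by omega)
      · rw [show r.toNat = k by omega] at hcur
        exact hcur

-- membership in one step of B's difference DP
lemma lswDiffStep_mem (D : PySem.Set Int) (t x : Int) :
    x ∈ lswDiffStep D t ↔ (∃ d ∈ D, x = |d - t|) ∨ (∃ d ∈ D, x = d + t) := by
  rw [lswDiffStep, PySem.Set.mem_union, PySem.Set.mem_ofList, PySem.Set.mem_ofList,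
    List.mem_map, List.mem_map]
  constructor
  · rintro (⟨d, hd, rfl⟩ | ⟨d, hd, rfl⟩)
    · exact Or.inl ⟨d, hd, rfl⟩
    · exact Or.inr ⟨d, hd, rfl⟩
  · rintro (⟨d, hd, rfl⟩ | ⟨d, hd, rfl⟩)
    · exact Or.inl ⟨d, hd, rfl⟩
    · exact Or.inr ⟨d, hd, rfl⟩

-- B's difference set = absolute values of (processed sum − 2·subset sum)
def lswInv2 (c : Int) (D : PySem.Set Int) (S : PySem.Set Int) : Prop :=
  ∀ x, x ∈ D ↔ ∃ s ∈ S, x = |c - 2 * s|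

lemma lswInv2_step (c t : Int) (ht : 0 ≤ t) (D S : PySem.Set Int) (h : lswInv2 c D S) :
    lswInv2 (c + t) (lswDiffStep D t) (lswSumsStep S t) := by
  intro x
  rw [lswDiffStep_mem]
  constructor
  · rintro (⟨d, hd, rfl⟩ | ⟨d, hd, rfl⟩) <;> obtain ⟨s, hs, rfl⟩ := (h d).1 hd
    · -- x = ||c - 2s| - t|
      rcases le_or_gt 0 (c - 2 * s) with hc | hc
      · refine ⟨s + t, (lswSumsStep_mem S t _).2 (Or.inr (by simpa using hs)), ?_⟩
        rw [abs_of_nonneg hc]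
        congr 1; ring
      · refine ⟨s, (lswSumsStep_mem S t _).2 (Or.inl hs), ?_⟩
        rw [abs_of_neg hc, show -(c - 2 * s) - t = -(c + t - 2 * s) by ring, abs_neg]
    · -- x = |c - 2s| + t
      rcases le_or_gt 0 (c - 2 * s) with hc | hc
      · refine ⟨s, (lswSumsStep_mem S t _).2 (Or.inl hs), ?_⟩
        rw [abs_of_nonneg hc, abs_of_nonneg (show (0:Int) ≤ c + t - 2 * s by omega)]
        ring
      · refine ⟨s + t, (lswSumsStep_mem S t _).2 (Or.inr (by simpa using hs)), ?_⟩
        rw [abs_of_neg hc, abs_of_neg (show c + t - 2 * (s + t) < 0 by omega)]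
        ring
  · rintro ⟨s', hs', rfl⟩
    rw [lswSumsStep_mem] at hs'
    rcases hs' with hs | hs
    · -- s' ∈ S : |c + t - 2s'|
      rcases le_or_gt 0 (c - 2 * s') with hc | hc
      · refine Or.inr ⟨|c - 2 * s'|, (h _).2 ⟨s', hs, rfl⟩, ?_⟩
        rw [abs_of_nonneg (show (0:Int) ≤ c + t - 2 * s' by omega), abs_of_nonneg hc]
        ring
      · refine Or.inl ⟨|c - 2 * s'|, (h _).2 ⟨s', hs, rfl⟩, ?_⟩
        rw [abs_of_neg hc, show -(c - 2 * s') - t = -(c + t - 2 * s') by ring, abs_neg]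
    · -- s' - t ∈ S : |c + t - 2s'| = |(c - 2(s'-t)) - t|
      rcases le_or_gt 0 (c - 2 * (s' - t)) with hc | hc
      · refine Or.inl ⟨|c - 2 * (s' - t)|, (h _).2 ⟨s' - t, hs, rfl⟩, ?_⟩
        rw [abs_of_nonneg hc]
        congr 1; ring
      · refine Or.inr ⟨|c - 2 * (s' - t)|, (h _).2 ⟨s' - t, hs, rfl⟩, ?_⟩
        rw [abs_of_neg hc, show c + t - 2 * s' = c - 2 * (s' - t) - t by ring,
          abs_of_neg (show c - 2 * (s' - t) - t < 0 by omega)]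
        ring

lemma lswInv2_fold :
    ∀ (l : List Int), (∀ x ∈ l, 0 ≤ x) → ∀ (c : Int) (D S : PySem.Set Int), lswInv2 c D S →
      lswInv2 (c + l.sum) (l.foldl lswDiffStep D) (l.foldl lswSumsStep S) := by
  intro l
  induction l with
  | nil => intro _ c D S h; simpa using h
  | cons x xs ih =>
    intro hl c D S h
    simp only [List.foldl_cons, List.sum_cons]
    have := ih (fun y hy => hl y (List.mem_cons_of_mem _ hy)) (c + x) _ _
      (lswInv2_step c x (hl x List.mem_cons_self) D S h)
    rwa [show c + (x + xs.sum) = c + x + xs.sum by ring]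

-- the ghost subset-sum set is closed under complementation s ↦ (processed sum) − s
lemma lswCompl_fold :
    ∀ (l : List Int) (c : Int) (S : PySem.Set Int), (∀ s ∈ S, c - s ∈ S) →
      ∀ s ∈ l.foldl lswSumsStep S, (c + l.sum) - s ∈ l.foldl lswSumsStep S := by
  intro l
  induction l with
  | nil => intro c S h s hs; simpa using h s hs
  | cons x xs ih =>
    intro c S h s hs
    simp only [List.foldl_cons, List.sum_cons] at *
    have hstep : ∀ u ∈ lswSumsStep S x, (c + x) - u ∈ lswSumsStep S x := by
      intro u hu
      rw [lswSumsStep_mem] at hu ⊢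
      rcases hu with hu | hu
      · exact Or.inr (by rw [show c + x - u - x = c - u by ring]; exact h u hu)
      · exact Or.inl (by rw [show c + x - u = c - (u - x) by ring]; exact h _ hu)
    have := ih (c + x) _ hstep s hs
    rwa [show c + (x + xs.sum) = c + x + xs.sum by ring]

-- ===== VERDICT (by name: the statement is the Claim_ definition above) =====
theorem lastStoneWeightII_spec : Claim_equal_lastStoneWeightII := by
  unfold Claim_equal_lastStoneWeightII
  intro stones _ hpre
  unfold Spec_lastStoneWeightII lastStoneWeightII lastStoneWeightII_alt
  dsimp only
  have hsum : 0 ≤ stones.sum := List.sum_nonneg fun x hx => hpre x hx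
  have htdiv : stones.sum >>> (1 : Nat) = stones.sum / 2 := by
    rw [Int.shiftRight_eq_div_pow]; norm_num
  have ht : 0 ≤ stones.sum >>> (1 : Nat) := by rw [htdiv]; omega
  have htot : stones.sum >>> (1 : Nat) ≤ stones.sum ∧
      stones.sum ≤ 2 * (stones.sum >>> (1 : Nat)) + 1 ∧
      2 * (stones.sum >>> (1 : Nat)) ≤ stones.sum := by
    rw [htdiv]; omega
  set target := stones.sum >>> (1 : Nat) with htar
  set dpF := stones.foldl (lswDpStep target)
      ((List.replicate (target + 1).toNat false).set 0 true) with hdpF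
  set SF := stones.foldl lswSumsStep (PySem.Set.ofList [0]) with hSF
  set DF := stones.foldl lswDiffStep (PySem.Set.ofList [0]) with hDF
  obtain ⟨hlen, hposS, hmem⟩ :=
    lswInv_fold target ht stones hpre _ _ (lswInv_init target)
  have h0S : (0 : Int) ∈ SF := lswZero_mem stones _ (by rw [PySem.Set.mem_ofList]; simp)
  have hdp0 : dpF.getD 0 false = true := by
    have := (hmem 0 (by exact_mod_cast ht)).2 (by exact_mod_cast h0S)
    exact this
  have hfr := lswFindReach_spec dpF (target.toNat + 1) target ht
    (by push_cast; omega) ⟨0, by exact_mod_cast ht, hdp0⟩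
  set r := lswFindReach dpF (target.toNat + 1) target with hrdef
  -- r is the greatest element of SF that is ≤ target
  have hrS : r ∈ SF := by
    have := (hmem r.toNat (by rw [Int.toNat_of_nonneg hfr.1]; exact hfr.2.1)).1 hfr.2.2.1
    rwa [Int.toNat_of_nonneg hfr.1] at this
  have hrmax : ∀ s ∈ SF, s ≤ target → s ≤ r := by
    intro s hs hst
    by_contra hc
    rw [not_le] at hc
    have h0s := hposS s hs
    have hfalse := hfr.2.2.2 s.toNat (by rw [Int.toNat_of_nonneg h0s]; omega)
      (by rw [Int.toNat_of_nonneg h0s]; exact hst)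
    have htrue := (hmem s.toNat (by rw [Int.toNat_of_nonneg h0s]; exact hst)).2
      (by rw [Int.toNat_of_nonneg h0s]; exact hs)
    rw [htrue] at hfalse
    exact Bool.false_ne_true hfalse.symm
  -- DF characterization
  have hinv2 : lswInv2 stones.sum DF SF := by
    have h0 : lswInv2 0 (PySem.Set.ofList [0]) (PySem.Set.ofList [0]) := by
      intro x
      rw [PySem.Set.mem_ofList]
      constructor
      · intro hx; refine ⟨0, by rw [PySem.Set.mem_ofList]; simp, ?_⟩
        simp at hx; simp [hx]
      · rintro ⟨s, hs, rfl⟩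
        rw [PySem.Set.mem_ofList] at hs; simp at hs; simp [hs]
    have := lswInv2_fold stones hpre 0 _ _ h0
    simpa using this
  have hcompl : ∀ s ∈ SF, stones.sum - s ∈ SF := by
    have h0 : ∀ s ∈ PySem.Set.ofList ([0] : List Int), (0 : Int) - s ∈ PySem.Set.ofList [0] := by
      intro s hs; rw [PySem.Set.mem_ofList] at hs ⊢; simp at hs; simp [hs]
    have := lswCompl_fold stones 0 _ h0
    simpa using this
  -- total - 2r is the least element of DF
  have hrin : stones.sum - 2 * r ∈ DF := by
    refine (hinv2 _).2 ⟨r, hrS, ?_⟩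
    rw [abs_of_nonneg (by omega)]
  have hlb : ∀ x ∈ DF, stones.sum - 2 * r ≤ x := by
    intro x hx
    obtain ⟨s, hs, rfl⟩ := (hinv2 x).1 hx
    have h0s := hposS s hs
    have hsc := hcompl s hs
    have hsle : s ≤ stones.sum := by
      have := hposS _ hsc; omega
    rcases le_or_gt s target with hst | hst
    · have := hrmax s hs hst
      rw [abs_of_nonneg (by omega)]; omega
    · have hsct : stones.sum - s ≤ target := by omega
      have := hrmax _ hsc hsct
      rw [abs_of_neg (by omega)]; omega
  obtain ⟨m, hm⟩ : ∃ m, PySem.List.min? DF (fun d => d) = some m := by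
    rcases h : PySem.List.min? DF (fun d => d) with _ | m
    · rw [PySem.List.min?_eq_none_iff] at h
      exact absurd h (List.ne_nil_of_mem hrin)
    · exact ⟨m, rfl⟩
  have hmem' := PySem.List.min?_mem hm
  have h1 : stones.sum - 2 * r ≤ m := hlb m hmem'
  have h2 : m ≤ stones.sum - 2 * r := PySem.List.min?_isMin hm _ hrin
  rw [hm]
  simp only [Option.getD_some]
  omega
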